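-- pv_equiv track=rewrite | github.com/Hetchy/Quranic-Phonemizer | core/loader.py | _parse_endpoint
-- ===== SOURCE A (Python) =====
-- from typing import Dict, List, Tuple
--
-- def _parse_endpoint(spec: str) -> Tuple[int, int, int | None]:
--     """
--     Turn 'n', 'n:n', or 'n:n:n' into a tuple (s, v, w_or_None).
--     """
--     parts = [int(p) for p in spec.split(":")]
--     if len(parts) == 1:        # surah
--         return parts[0], None, None
--     if len(parts) == 2:        # verse
--         return parts[0], parts[1], None
--     if len(parts) == 3:        # word
--         return parts[0], parts[1], parts[2]
--     raise ValueError(f"Bad reference component: {spec}")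
-- ===== SOURCE B (Python) =====
-- def _parse_endpoint(spec: str):
--     # Recursive descent: peel one ':'-separated piece at a time with find(),
--     # allowing at most 3 pieces, then pad with None and pack the tuple.
--     def go(s, slots):
--         i = s.find(":")
--         if i < 0:
--             return [int(s)]
--         if slots == 1:
--             raise ValueError(f"Bad reference component: {spec}")
--         return [int(s[:i])] + go(s[i + 1:], slots - 1)
--
--     nums = go(spec, 3) + [None, None]
--     return (nums[0], nums[1], nums[2])
-- ===== Notes on version B (the rewrite author's own statement) =====
-- stated objective: alternative
-- what changed: Replaces split-into-a-list plus three per-length return branches with a fuel-limited recursive descent that peels one ':'-piece at a time via find() and slicing, then pads with None and packs the tuple.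
import Mathlib
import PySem

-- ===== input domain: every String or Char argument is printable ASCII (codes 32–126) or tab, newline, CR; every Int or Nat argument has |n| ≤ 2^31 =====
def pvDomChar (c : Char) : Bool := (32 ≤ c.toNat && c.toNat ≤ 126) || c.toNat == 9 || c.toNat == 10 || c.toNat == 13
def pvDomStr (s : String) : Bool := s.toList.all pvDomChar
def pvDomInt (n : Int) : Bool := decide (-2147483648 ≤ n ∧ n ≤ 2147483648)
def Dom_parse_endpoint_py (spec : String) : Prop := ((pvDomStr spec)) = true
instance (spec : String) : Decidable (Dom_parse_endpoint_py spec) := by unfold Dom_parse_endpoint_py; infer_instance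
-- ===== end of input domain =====

-- B replaces A's split-then-branch-per-length scheme with a recursive descent that peels
-- one ':'-piece at a time via find() and slicing, fuel-limited to 3 pieces (objective: alternative).

-- ===== PORT A =====
-- spec.split(":") — sep is nonempty so Python never raises; split? is some there
def pvSplitColon (spec : String) : List String := (PySem.Str.split? spec ":").getD []

-- parts = [int(p) for p in spec.split(":")]; int() may raise ValueError → mapM is none there (outside Pre_)
def parse_endpoint_py (spec : String) : Int × Option Int × Option Int :=
  match (pvSplitColon spec).mapM PySem.Int.ofStr? with
  | none => (0, none, none)       -- ValueError from int(); outside Pre_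
  | some parts =>
    if parts.length = 1 then (parts.getD 0 0, none, none)
    else if parts.length = 2 then (parts.getD 0 0, some (parts.getD 1 0), none)
    else if parts.length = 3 then (parts.getD 0 0, some (parts.getD 1 0), some (parts.getD 2 0))
    else (0, none, none)          -- raise ValueError; outside Pre_

-- ===== PORT B =====
-- go(s, slots): i = s.find(':'); no colon → [int(s)]; slots == 1 → raise (none); else int(s[:i]) :: go(s[i+1:], slots-1)
def pvGoB (slots : Nat) (s : List Char) : Option (List Int) :=
    let i := PySem.Chars.find s [':']
    if i < 0 then (PySem.Int.ofChars? s).map (fun n => [n])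
    else if slots ≤ 1 then none   -- slots == 1: raise ValueError (outside Pre_); slots = 0 is dead (go starts at 3)
    else
      match PySem.Int.ofChars? (PySem.List.slice s none (some i)),
            pvGoB (slots - 1) (PySem.List.slice s (some (i + 1)) none) with
      | some v, some rest => some (v :: rest)
      | _, _ => none              -- ValueError from int() below; outside Pre_
termination_by slots
decreasing_by omega

-- nums = go(spec, 3) + [None, None]; return (nums[0], nums[1], nums[2])
def parse_endpoint_py_alt (spec : String) : Int × Option Int × Option Int :=
  match pvGoB 3 spec.toList with
  | none => (0, none, none)       -- an exception escaped go; outside Pre_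
  | some nums =>
    let p := nums.map some ++ [none, none]
    (nums.getD 0 0, p.getD 1 none, p.getD 2 none)

-- ===== PRECONDITION & SPEC =====
-- Pre_ excludes exactly the inputs where A raises ValueError: some piece is not int()-parseable, or there are more than 3 pieces.
def Pre_parse_endpoint_py (spec : String) : Prop :=
  1 ≤ ((PySem.Str.split? spec ":").getD []).length ∧ ((PySem.Str.split? spec ":").getD []).length ≤ 3 ∧
  ∀ p ∈ (PySem.Str.split? spec ":").getD [], (PySem.Int.ofStr? p).isSome
instance (spec : String) : Decidable (Pre_parse_endpoint_py spec) := by unfold Pre_parse_endpoint_py; infer_instance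
def pvWitness_parse_endpoint_py : String := "2:5"
def Spec_parse_endpoint_py (spec : String) (out : Int × Option Int × Option Int) : Prop := out = parse_endpoint_py_alt spec
instance (spec : String) (out : Int × Option Int × Option Int) : Decidable (Spec_parse_endpoint_py spec out) := by unfold Spec_parse_endpoint_py; infer_instance

-- ===== CLAIM (what is proved, stated in full; the proofs are below) =====
def Claim_equal_parse_endpoint_py : Prop := ∀ (spec : String), Dom_parse_endpoint_py spec → Pre_parse_endpoint_py spec → Spec_parse_endpoint_py spec (parse_endpoint_py spec)

-- ===== LEMMAS AND PROOFS =====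

-- a simple structural model of s.split(":") used only by the proofs
def pvSplit1 : List Char → List (List Char)
  | [] => [[]]
  | c :: rest =>
    if c = ':' then [] :: pvSplit1 rest
    else
      match pvSplit1 rest with
      | [] => [[c]]               -- unreachable
      | h :: t => (c :: h) :: t

theorem pvSplit1_ne_nil : ∀ s : List Char, pvSplit1 s ≠ [] := by
  intro s
  cases s with
  | nil => simp [pvSplit1]
  | cons c rest =>
    simp only [pvSplit1]
    split_ifs
    · simp
    · cases h : pvSplit1 rest <;> simp

theorem pv_go_eq : ∀ (fuel : Nat) (s cur : List Char) (acc : List (List Char)), s.length ≤ fuel →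
    PySem.Chars.splitOn.go [':'] fuel s cur acc =
      acc.reverse ++ (match pvSplit1 s with
        | [] => [cur.reverse]
        | h :: t => (cur.reverse ++ h) :: t) := by
  intro fuel
  induction fuel with
  | zero =>
    intro s cur acc hs
    have : s = [] := List.length_eq_zero_iff.mp (Nat.le_zero.mp hs)
    subst this
    simp [PySem.Chars.splitOn.go, pvSplit1]
  | succ f ih =>
    intro s cur acc hs
    cases s with
    | nil => simp [PySem.Chars.splitOn.go, pvSplit1]
    | cons c rest =>
      rw [PySem.Chars.splitOn.go.eq_def]
      simp only []
      by_cases hc : c = ':'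
      · subst hc
        have hpre : List.isPrefixOf [':'] (':' :: rest) = true := by simp [List.isPrefixOf]
        simp only [hpre, if_pos]
        simp only [List.length_cons, List.length_nil, List.drop_succ_cons, List.drop_zero]
        rw [ih rest [] (cur.reverse :: acc) (by simpa using Nat.le_of_succ_le_succ hs)]
        cases h : pvSplit1 rest with
        | nil => exact absurd h (pvSplit1_ne_nil rest)
        | cons h1 t1 => simp [pvSplit1, h]
      · have hpre : List.isPrefixOf [':'] (c :: rest) = false := by
          simp only [List.isPrefixOf, List.isPrefixOf_nil_left, Bool.and_eq_false_iff]
          cases c <;> simp_all [List.isPrefixOf]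
          exact fun hh => hc (by simpa using hh.symm)
        simp only [hpre, Bool.false_eq_true, if_false]
        rw [ih rest (c :: cur) acc (by simpa using Nat.le_of_succ_le_succ hs)]
        cases h : pvSplit1 rest with
        | nil => exact absurd h (pvSplit1_ne_nil rest)
        | cons h1 t1 => simp [pvSplit1, h, hc]

theorem pv_splitOn_eq (s : List Char) : PySem.Chars.splitOn s [':'] = pvSplit1 s := by
  unfold PySem.Chars.splitOn
  rw [pv_go_eq (s.length + 1) s [] [] (Nat.le_succ _)]
  cases h : pvSplit1 s with
  | nil => exact absurd h (pvSplit1_ne_nil s)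
  | cons h1 t1 => simp

theorem pvSplit1_no_colon (s : List Char) (h : ':' ∉ s) : pvSplit1 s = [s] := by
  induction s with
  | nil => rfl
  | cons c rest ih =>
    have hc : ¬ c = ':' := fun hh => h (hh ▸ List.mem_cons_self)
    have hr := ih (fun hm => h (List.mem_cons_of_mem _ hm))
    simp [pvSplit1, hc, hr]

theorem pvSplit1_append (xs ys : List Char) (h : ':' ∉ xs) :
    pvSplit1 (xs ++ ':' :: ys) = xs :: pvSplit1 ys := by
  induction xs with
  | nil => simp [pvSplit1]
  | cons c rest ih =>
    have hc : ¬ c = ':' := fun hh => h (hh ▸ List.mem_cons_self)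
    have hr := ih (fun hm => h (List.mem_cons_of_mem _ hm))
    simp [pvSplit1, hc, hr]

-- [':'] is a prefix of l.drop i exactly when l[i]? = some ':'
theorem pv_singleton_prefix_drop (l : List Char) (i : Nat) :
    [':'] <+: l.drop i ↔ l[i]? = some ':' := by
  constructor
  · rintro ⟨t, ht⟩
    have : (l.drop i).head? = some ':' := by rw [← ht]; rfl
    simpa [List.head?_drop] using this
  · intro h
    have : (l.drop i).head? = some ':' := by simpa [List.head?_drop] using h
    cases hd : l.drop i with
    | nil => simp [hd] at this
    | cons a t =>
      rw [hd] at this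
      simp at this
      exact ⟨t, by simp [this]⟩

-- the find-based step of B, expressed on pvSplit1
theorem pv_split_step (s : List Char) :
    (PySem.Chars.find s [':'] < 0 → pvSplit1 s = [s]) ∧
    (0 ≤ PySem.Chars.find s [':'] →
      pvSplit1 s = s.take (PySem.Chars.find s [':']).toNat ::
        pvSplit1 (s.drop ((PySem.Chars.find s [':']).toNat + 1))) := by
  constructor
  · intro hneg
    have h1 : PySem.Chars.find s [':'] = -1 := by
      have := PySem.Chars.neg_one_le_find s [':']
      omega
    have hnin : ¬ [':'] <:+: s := (PySem.Chars.find_eq_neg_one_iff s [':']).mp h1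
    apply pvSplit1_no_colon
    intro hm
    obtain ⟨l1, l2, hl⟩ := List.append_of_mem hm
    exact hnin ⟨l1, l2, by simp [hl]⟩
  · intro hpos
    obtain ⟨hpre, hfirst⟩ := PySem.Chars.find_spec hpos
    set k := (PySem.Chars.find s [':']).toNat with hk
    have hget : s[k]? = some ':' := (pv_singleton_prefix_drop s k).mp hpre
    have hklt : k < s.length := by
      by_contra hh
      rw [List.getElem?_eq_none (Nat.le_of_not_lt hh)] at hget
      cases hget
    have hsk : s[k] = ':' := by
      have := List.getElem?_eq_getElem hklt
      rw [this] at hget; exact Option.some.inj hget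
    have hdecomp : s = s.take k ++ ':' :: s.drop (k + 1) := by
      conv_lhs => rw [← List.take_append_drop k s]
      congr 1
      rw [List.drop_eq_getElem_cons hklt, hsk]
    have hnotin : ':' ∉ s.take k := by
      intro hm
      obtain ⟨i, hi, hgi⟩ := List.mem_iff_getElem.mp hm
      have hik : i < k := lt_of_lt_of_le hi (List.length_take_le _ _)
      refine hfirst i hik ((pv_singleton_prefix_drop s i).mpr ?_)
      rw [List.getElem?_eq_getElem (by omega)]
      have : (s.take k)[i] = s[i] := List.getElem_take
      rw [← this, hgi]
    conv_lhs => rw [hdecomp]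
    rw [pvSplit1_append _ _ hnotin]

-- go(s, slots) computes exactly the int() of all pieces when there are at most `slots` of them
theorem pv_goB_eq : ∀ (slots : Nat) (s : List Char), 1 ≤ slots → (pvSplit1 s).length ≤ slots →
    pvGoB slots s = (pvSplit1 s).mapM PySem.Int.ofChars? := by
  intro slots
  induction slots with
  | zero => intro s h; omega
  | succ n ih =>
    intro s _ hlen
    unfold pvGoB
    simp only []
    by_cases hneg : PySem.Chars.find s [':'] < 0
    · rw [if_pos hneg, (pv_split_step s).1 hneg]
      cases h : PySem.Int.ofChars? s <;> simp [h, List.mapM_cons]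
    · rw [if_neg hneg]
      have hpos : 0 ≤ PySem.Chars.find s [':'] := by omega
      have hsplit := (pv_split_step s).2 hpos
      set k := (PySem.Chars.find s [':']).toNat with hk
      have hlen2 : 2 ≤ (pvSplit1 s).length := by
        rw [hsplit]
        have := pvSplit1_ne_nil (s.drop (k + 1))
        cases h : pvSplit1 (s.drop (k + 1)) with
        | nil => exact absurd h this
        | cons a t => simp
      rw [if_neg (by omega)]
      have hslice1 : PySem.List.slice s none (some (PySem.Chars.find s [':'])) = s.take k := by
        rw [PySem.List.slice_to s hpos]
      have hslice2 : PySem.List.slice s (some (PySem.Chars.find s [':'] + 1)) none = s.drop (k + 1) := by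
        rw [PySem.List.slice_from s (by omega : (0:Int) ≤ PySem.Chars.find s [':'] + 1)]
        congr 1
        omega
      rw [hslice1, hslice2]
      simp only [Nat.add_sub_cancel]
      rw [ih (s.drop (k + 1)) (by omega) (by
        rw [hsplit] at hlen; simpa using Nat.le_of_succ_le_succ hlen)]
      rw [hsplit, List.mapM_cons]
      cases h1 : PySem.Int.ofChars? (s.take k) <;>
        cases h2 : (pvSplit1 (s.drop (k + 1))).mapM PySem.Int.ofChars? <;> rfl

theorem pv_mapM_ofList (l : List (List Char)) :
    (l.map String.ofList).mapM PySem.Int.ofStr? = l.mapM PySem.Int.ofChars? := by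
  induction l with
  | nil => rfl
  | cons x xs ih => simp [List.mapM_cons, ih, PySem.Int.ofStr?]

theorem pv_mapM_length {α β : Type} (f : α → Option β) :
    ∀ (xs : List α) (ys : List β), xs.mapM f = some ys → ys.length = xs.length := by
  intro xs
  induction xs with
  | nil => intro ys h; simp_all [List.mapM_nil]
  | cons x xs ih =>
    intro ys h
    rw [List.mapM_cons] at h
    cases hfx : f x with
    | none => simp [hfx] at h
    | some b =>
      cases hxs : xs.mapM f with
      | none => simp [hfx, hxs] at h
      | some zs =>
        simp [hfx, hxs] at h
        simp [← h, ih zs hxs]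

theorem pv_mapM_isSome {α β : Type} (f : α → Option β) :
    ∀ (xs : List α), (∀ p ∈ xs, (f p).isSome) → (xs.mapM f).isSome := by
  intro xs
  induction xs with
  | nil => intro _; simp [List.mapM_nil]
  | cons x xs ih =>
    intro hall
    have hx := hall x (List.mem_cons_self)
    have hrest := ih (fun p hp => hall p (List.mem_cons_of_mem _ hp))
    cases hfx : f x with
    | none => simp [hfx] at hx
    | some b =>
      cases hxs : xs.mapM f with
      | none => simp [hxs] at hrest
      | some zs => simp [List.mapM_cons, hfx, hxs]

-- A's piece list is pvSplit1 of the characters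
theorem pv_splitColon_eq (spec : String) :
    pvSplitColon spec = (pvSplit1 spec.toList).map String.ofList := by
  unfold pvSplitColon
  simp [PySem.Str.split?, PySem.Chars.split?, pv_splitOn_eq]

-- ===== VERDICT (by name: the statement is the Claim_ definition above) =====
theorem parse_endpoint_py_spec : Claim_equal_parse_endpoint_py := by
  intro spec _ hpre
  obtain ⟨h1, h3, hall⟩ := hpre
  have hsc := pv_splitColon_eq spec
  unfold Spec_parse_endpoint_py parse_endpoint_py parse_endpoint_py_alt
  rw [hsc, pv_mapM_ofList]
  have hlen1 : ((PySem.Str.split? spec ":").getD []).length = (pvSplit1 spec.toList).length := by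
    rw [show (PySem.Str.split? spec ":").getD [] = pvSplitColon spec from rfl, hsc]
    simp
  rw [hlen1] at h1 h3
  rw [pv_goB_eq 3 spec.toList (by omega) h3]
  cases h : (pvSplit1 spec.toList).mapM PySem.Int.ofChars? with
  | none =>
    have hs : (∀ p ∈ pvSplit1 spec.toList, (PySem.Int.ofChars? p).isSome) := by
      intro p hp
      have := hall (String.ofList p) (by
        rw [show (PySem.Str.split? spec ":").getD [] = pvSplitColon spec from rfl, hsc]
        exact List.mem_map_of_mem hp)
      simpa [PySem.Int.ofStr?] using this
    have := pv_mapM_isSome PySem.Int.ofChars? _ hs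
    simp [h] at this
  | some parts =>
    have hlen := pv_mapM_length PySem.Int.ofChars? _ _ h
    rcases parts with _ | ⟨a, _ | ⟨b, _ | ⟨c, _ | ⟨d, t⟩⟩⟩⟩
    · simp at hlen; omega
    · simp [List.getD]
    · simp [List.getD]
    · simp [List.getD]
    · exfalso; simp at hlen; omega
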